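-- pv_equiv track=rewrite | github.com/RacheinWu/ACMP | 秋季赛1.py | minNumBooths
-- ===== SOURCE A (Python) =====
-- from typing import List, Counter
--
-- def minNumBooths(demand: List[str]) -> int:
--     dic = dict()
--     res = 0
--     length = len(demand)
--     for i in range(length):
--         sub = dict()
--         for j in range(len(demand[i])):
--             if demand[i][j] not in sub:
--                 sub[demand[i][j]] = 1
--             else:
--                 sub[demand[i][j]] += 1
--         for k, v in sub.items():
--             if k not in dic:
--                 dic[k] = v
--                 res += v
--             elif v > dic[k]:
--                 res += v - dic[k]
--                 dic[k] = v
--     return res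
-- ===== SOURCE B (Python) =====
-- def minNumBooths(demand):
--     # Character-major strategy: first collect the distinct characters that
--     # occur anywhere, then for each such character take the maximum number
--     # of times any single string needs it, and add those maxima up.
--     chars = set()
--     for s in demand:
--         chars.update(s)
--     return sum(max(s.count(c) for s in demand) for c in chars)
-- ===== Notes on version B (the rewrite author's own statement) =====
-- stated objective: alternative
-- what changed: B is character-major: it first collects the set of distinct characters occurring in any string, then for each such character computes max(s.count(c) for s in demand) and sums these maxima - there is no per-string frequency dict and no running max-table/accumulator as in A's string-major single pass.
import Mathlib
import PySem

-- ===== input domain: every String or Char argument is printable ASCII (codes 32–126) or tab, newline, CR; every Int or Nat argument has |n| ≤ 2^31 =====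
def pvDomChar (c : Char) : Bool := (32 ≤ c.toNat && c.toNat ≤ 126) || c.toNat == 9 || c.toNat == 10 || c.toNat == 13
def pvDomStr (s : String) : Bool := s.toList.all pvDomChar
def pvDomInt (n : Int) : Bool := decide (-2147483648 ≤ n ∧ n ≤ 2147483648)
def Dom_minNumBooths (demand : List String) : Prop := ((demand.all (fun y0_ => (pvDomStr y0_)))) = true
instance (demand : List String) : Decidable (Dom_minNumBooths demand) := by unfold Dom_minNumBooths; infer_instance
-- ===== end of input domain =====

-- B replaces A's string-major pass with a running max-table and threaded sum by a
-- character-major computation: distinct characters first, then sum of per-character max s.count(c).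

-- ===== PORT A =====
-- inner counting loop of A: if c not in sub: sub[c] = 1 else: sub[c] += 1
def aSub (l : List Char) : PySem.Dict Char Int :=
  l.foldl (fun sub c =>
    if sub.contains c = false then sub.insert c 1
    else sub.insert c (sub.getD c 0 + 1)) PySem.Dict.empty

-- body of A's 'for k, v in sub.items()' loop over the state (dic, res)
def aStep (st : PySem.Dict Char Int × Int) (kv : Char × Int) : PySem.Dict Char Int × Int :=
  if st.1.contains kv.1 = false then (st.1.insert kv.1 kv.2, st.2 + kv.2)
  else if st.1.getD kv.1 0 < kv.2 then (st.1.insert kv.1 kv.2, st.2 + (kv.2 - st.1.getD kv.1 0))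
  else st

def minNumBooths (demand : List String) : Int :=
  (demand.foldl (fun st s => (aSub s.toList).items.foldl aStep st) (PySem.Dict.empty, 0)).2

-- ===== PORT B =====
-- 'chars = set(); for s in demand: chars.update(s)'
def bChars (demand : List String) : PySem.Set Char :=
  demand.foldl (fun st s => PySem.Set.update st s.toList) PySem.Set.empty

-- 'max(s.count(c) for s in demand)'; the '.getD 0' only totalizes the unreachable
-- empty-generator case (bMax is applied to characters occurring in some string of demand)
def bMax (demand : List String) (c : Char) : Int :=
  ((PySem.List.max? (demand.map (fun s => (PySem.Chars.count s.toList [c] : Int)))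
      (fun x => x)).getD 0)

-- 'sum(max(...) for c in chars)' — a sum over the set, order-independent
def minNumBooths_alt (demand : List String) : Int :=
  ((bChars demand).map (fun c => bMax demand c)).sum

-- ===== PRECONDITION & SPEC =====
def Spec_minNumBooths (demand : List String) (out : Int) : Prop := out = minNumBooths_alt demand
instance (demand : List String) (out : Int) : Decidable (Spec_minNumBooths demand out) := by unfold Spec_minNumBooths; infer_instance

-- ===== CLAIM (what is proved, stated in full; the proofs are below) =====
def Claim_equal_minNumBooths : Prop := ∀ (demand : List String), Dom_minNumBooths demand → Spec_minNumBooths demand (minNumBooths demand)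

-- ===== LEMMAS AND PROOFS =====

-- ---- proof-only model of A: the max-table without the threaded sum ----
def tStep (m : PySem.Dict Char Int) (kv : Char × Int) : PySem.Dict Char Int :=
  if m.getD kv.1 0 < kv.2 then m.insert kv.1 kv.2 else m

def tFoldFrom (demand : List String) (m : PySem.Dict Char Int) : PySem.Dict Char Int :=
  demand.foldl (fun m s => (PySem.Dict.counter s.toList).items.foldl tStep m) m

-- A's hand-rolled character count is Counter(s)
lemma aSub_eq_counter (l : List Char) : aSub l = PySem.Dict.counter l := by
  have h : aSub l = l.foldl (fun (d : PySem.Dict Char Int) x => d.insert x (d.getD x 0 + 1)) PySem.Dict.empty := by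
    unfold aSub
    congr 1
    funext sub c
    by_cases h : sub.contains c = false
    · simp [h, PySem.Dict.getD_of_not_contains sub (0 : Int) h]
    · simp [h]
  rw [h, PySem.Dict.foldl_insert_getD_add_one_eq_counter]

-- replacing the (unique) entry at key k by v changes the value-sum by v - old
lemma sum_map_if (l : List (Char × Int)) (k : Char) (w v : Int)
    (hnd : (l.map Prod.fst).Nodup) (hm : (k, w) ∈ l) :
    ((l.map (fun p => if p.1 == k then (k, v) else p)).map (·.2)).sum
      = (l.map (·.2)).sum + v - w := by
  induction l with
  | nil => simp at hm
  | cons p t ih =>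
    simp only [List.map_cons, List.nodup_cons] at hnd
    rcases List.mem_cons.mp hm with h1 | h1
    · obtain rfl := h1.symm
      have ht : ∀ q ∈ t, (if (q.1 == k) = true then ((k, v) : Char × Int) else q) = q := by
        intro q hq
        have hmem : q.1 ∈ t.map Prod.fst := List.mem_map_of_mem hq
        have hq1 : q.1 ≠ k := fun h => hnd.1 (h ▸ hmem)
        simp [hq1]
      have hmap : t.map (fun p => if (p.1 == k) = true then ((k, v) : Char × Int) else p) = t := by
        rw [List.map_congr_left ht]; simp
      have hc : (((k, w) : Char × Int).1 == k) = true := by simp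
      rw [List.map_cons, if_pos hc, hmap, List.map_cons, List.map_cons, List.sum_cons,
        List.sum_cons]
      ring
    · have hne : p.1 ≠ k := by
        intro h
        exact hnd.1 (h ▸ (List.mem_map_of_mem h1 : k ∈ t.map Prod.fst))
      have hc : ¬ ((p.1 == k) = true) := by simp [hne]
      rw [List.map_cons, if_neg hc, List.map_cons, List.map_cons, List.sum_cons, List.sum_cons,
        ih hnd.2 h1]
      ring

-- value-sum after an insert
lemma valsum_insert (d : PySem.Dict Char Int) (k : Char) (v : Int) (hnd : d.keys.Nodup) :
    ((d.insert k v).values).sum = d.values.sum + v - d.getD k 0 := by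
  by_cases h : d.contains k = true
  · obtain ⟨w, hw⟩ : ∃ w, d.get? k = some w := by
      rcases hg : d.get? k with _ | w
      · rw [PySem.Dict.contains_eq_isSome_get?, hg] at h; simp at h
      · exact ⟨w, rfl⟩
    have hmem : (k, w) ∈ d.items := PySem.Dict.mem_items_of_get?_eq_some d hw
    have hgd : d.getD k 0 = w := PySem.Dict.getD_of_get?_eq_some d 0 hw
    have hitems := PySem.Dict.items_insert_of_contains d v h
    simp only [PySem.Dict.values, hitems, hgd]
    exact sum_map_if d.items k w v hnd hmem
  · have h' : d.contains k = false := by simpa using h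
    have hitems := PySem.Dict.items_insert_of_not_contains d v h'
    simp [PySem.Dict.values, hitems, PySem.Dict.getD_of_not_contains d (0 : Int) h']

-- one item-step: A's (dic, res) stays (table, its value-sum); keys stay Nodup
lemma step_eq (d : PySem.Dict Char Int) (kv : Char × Int) (hnd : d.keys.Nodup) (hpos : 0 < kv.2) :
    aStep (d, d.values.sum) kv = (tStep d kv, (tStep d kv).values.sum) ∧ (tStep d kv).keys.Nodup := by
  unfold aStep tStep
  by_cases h : d.contains kv.1 = false
  · have hgd : d.getD kv.1 0 = 0 := PySem.Dict.getD_of_not_contains d (0 : Int) h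
    have hlt : d.getD kv.1 0 < kv.2 := by rw [hgd]; exact hpos
    rw [if_pos h, if_pos hlt]
    refine ⟨Prod.ext rfl ?_, PySem.Dict.nodup_keys_insert d kv.1 kv.2 hnd⟩
    simp [valsum_insert d kv.1 kv.2 hnd, hgd]
  · rw [if_neg h]
    by_cases hlt : d.getD kv.1 0 < kv.2
    · rw [if_pos hlt, if_pos hlt]
      refine ⟨Prod.ext rfl ?_, PySem.Dict.nodup_keys_insert d kv.1 kv.2 hnd⟩
      rw [valsum_insert d kv.1 kv.2 hnd]
      ring
    · rw [if_neg hlt, if_neg hlt]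
      exact ⟨rfl, hnd⟩

-- the inner fold over positive-valued items preserves the coupling
lemma inner_fold (l : List (Char × Int)) (d : PySem.Dict Char Int)
    (hnd : d.keys.Nodup) (hpos : ∀ p ∈ l, 0 < p.2) :
    l.foldl aStep (d, d.values.sum) = (l.foldl tStep d, (l.foldl tStep d).values.sum)
      ∧ (l.foldl tStep d).keys.Nodup := by
  induction l generalizing d with
  | nil => exact ⟨rfl, hnd⟩
  | cons p t ih =>
    obtain ⟨hs, hn⟩ := step_eq d p hnd (hpos p (List.mem_cons_self ..))
    simp only [List.foldl_cons, hs]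
    exact ih (tStep d p) hn (fun q hq => hpos q (List.mem_cons_of_mem _ hq))

-- Counter items carry positive counts
lemma counter_items_pos (l : List Char) : ∀ p ∈ (PySem.Dict.counter l).items, 0 < p.2 := by
  intro p hp
  rw [PySem.Dict.items_counter] at hp
  obtain ⟨k, hk, rfl⟩ := List.mem_map.mp hp
  have hk' : k ∈ l := (PySem.Set.mem_ofList l k).mp hk
  simpa using (List.count_pos_iff.mpr hk' : 0 < l.count k)

-- the outer fold over the strings preserves the coupling
lemma outer_fold (demand : List String) (d : PySem.Dict Char Int) (hnd : d.keys.Nodup) :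
    demand.foldl (fun st s => (aSub s.toList).items.foldl aStep st) (d, d.values.sum)
      = (tFoldFrom demand d, (tFoldFrom demand d).values.sum)
      ∧ (tFoldFrom demand d).keys.Nodup := by
  induction demand generalizing d with
  | nil => exact ⟨rfl, hnd⟩
  | cons s t ih =>
    obtain ⟨hs, hn⟩ := inner_fold (PySem.Dict.counter s.toList).items d hnd
      (counter_items_pos s.toList)
    simp only [tFoldFrom, List.foldl_cons, aSub_eq_counter, hs]
    simpa only [tFoldFrom, aSub_eq_counter] using ih _ hn

-- ---- s.count(c) for a single character is List.count ----
lemma count_go_single (c : Char) (fuel : Nat) (l : List Char) (acc : Nat)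
    (h : l.length ≤ fuel) :
    PySem.Chars.count.go [c] fuel l acc = acc + l.count c := by
  induction fuel generalizing l acc with
  | zero =>
    have : l = [] := List.length_eq_zero_iff.mp (Nat.le_zero.mp h)
    subst this; simp [PySem.Chars.count.go]
  | succ n ih =>
    cases l with
    | nil => simp [PySem.Chars.count.go]
    | cons x t =>
      have ht : t.length ≤ n := by simpa using h
      by_cases hx : c = x
      · subst hx
        have hpre : [c].isPrefixOf (c :: t) = true := by simp [List.isPrefixOf]
        simp only [PySem.Chars.count.go, hpre, if_pos, List.length_cons,
          List.length_nil, List.drop_succ_cons, List.drop_zero]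
        rw [ih t (acc + 1) ht]
        simp
        omega
      · have hpre : [c].isPrefixOf (x :: t) = false := by
          simp [List.isPrefixOf, hx]
        simp only [PySem.Chars.count.go, hpre]
        rw [if_neg (by simp), ih t acc ht]
        simp [Ne.symm hx]

lemma count_single (l : List Char) (c : Char) :
    PySem.Chars.count l [c] = l.count c := by
  unfold PySem.Chars.count
  rw [if_neg (by simp)]
  simpa using count_go_single c l.length l 0 le_rfl

-- ---- pointwise behaviour of the table step ----
lemma tStep_getD (m : PySem.Dict Char Int) (k : Char) (v : Int) (x : Char) :
    (tStep m (k, v)).getD x 0 = if x = k then max (m.getD x 0) v else m.getD x 0 := by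
  unfold tStep
  by_cases hx : x = k
  · subst hx
    by_cases hlt : m.getD x 0 < v
    · rw [if_pos hlt, if_pos rfl, PySem.Dict.getD_insert_self]
      omega
    · rw [if_neg hlt, if_pos rfl]
      omega
  · by_cases hlt : m.getD k 0 < v
    · rw [if_pos hlt, if_neg hx, PySem.Dict.getD_insert_of_ne m v 0 hx]
    · rw [if_neg hlt, if_neg hx]

-- fold of the table step over the items of Counter(l), pointwise
lemma foldA_getD (S : List Char) (l : List Char) (m : PySem.Dict Char Int) (c : Char)
    (hS : S.Nodup) :
    ((S.map (fun k => (k, (l.count k : Int)))).foldl tStep m).getD c 0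
      = if c ∈ S then max (m.getD c 0) ((l.count c : Int)) else m.getD c 0 := by
  induction S generalizing m with
  | nil => simp
  | cons k t ih =>
    simp only [List.nodup_cons] at hS
    simp only [List.map_cons, List.foldl_cons]
    rw [ih _ hS.2]
    by_cases hc : c = k
    · subst hc
      simp [hS.1, tStep_getD]
    · simp [hc, tStep_getD m k _ c]

lemma inner_getD (l : List Char) (m : PySem.Dict Char Int) (c : Char)
    (hnn : 0 ≤ m.getD c 0) :
    ((PySem.Dict.counter l).items.foldl tStep m).getD c 0
      = max (m.getD c 0) ((l.count c : Int)) := by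
  rw [PySem.Dict.items_counter,
    foldA_getD (PySem.Set.ofList l) l m c (PySem.Set.nodup_ofList l)]
  by_cases hc : c ∈ PySem.Set.ofList l
  · simp [hc]
  · have hcl : c ∉ l := fun h => hc ((PySem.Set.mem_ofList l c).mpr h)
    rw [if_neg hc, List.count_eq_zero_of_not_mem hcl]
    simp only [Nat.cast_zero]
    exact (max_eq_left hnn).symm

-- the table holds the running maximum of the per-string counts
lemma outer_getD (demand : List String) (m : PySem.Dict Char Int) (c : Char)
    (hnn : ∀ x, 0 ≤ m.getD x 0) :
    (tFoldFrom demand m).getD c 0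
      = (demand.map (fun s => ((s.toList.count c : Nat) : Int))).foldl max (m.getD c 0) := by
  induction demand generalizing m with
  | nil => simp [tFoldFrom]
  | cons s t ih =>
    simp only [tFoldFrom, List.foldl_cons, List.map_cons]
    have hstep : ∀ x, ((PySem.Dict.counter s.toList).items.foldl tStep m).getD x 0
        = max (m.getD x 0) ((s.toList.count x : Nat) : Int) :=
      fun x => inner_getD s.toList m x (hnn x)
    have := ih ((PySem.Dict.counter s.toList).items.foldl tStep m)
      (fun x => by rw [hstep x]; positivity)
    simp only [tFoldFrom] at this
    rw [this, hstep c]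

-- ---- key membership of the table ----
lemma tStep_mem_keys (m : PySem.Dict Char Int) (k : Char) (v : Int) (x : Char)
    (hpos : 0 < v) :
    x ∈ (tStep m (k, v)).keys ↔ x = k ∨ x ∈ m.keys := by
  unfold tStep
  by_cases hlt : m.getD k 0 < v
  · rw [if_pos hlt]
    exact PySem.Dict.mem_keys_insert m k x v
  · rw [if_neg hlt]
    constructor
    · exact Or.inr
    · rintro (rfl | hx)
      · have hne : m.getD x 0 ≠ 0 := by omega
        have hcon : m.contains x = true := by
          by_contra h
          exact hne (PySem.Dict.getD_of_not_contains m 0 (by simpa using h))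
        exact (PySem.Dict.contains_iff_mem_keys m x).mp hcon
      · exact hx

lemma fold_mem_keys (ps : List (Char × Int)) (m : PySem.Dict Char Int) (x : Char)
    (hpos : ∀ p ∈ ps, 0 < p.2) :
    x ∈ (ps.foldl tStep m).keys ↔ x ∈ m.keys ∨ x ∈ ps.map Prod.fst := by
  induction ps generalizing m with
  | nil => simp
  | cons p t ih =>
    simp only [List.foldl_cons, List.map_cons, List.mem_cons]
    rw [ih _ (fun q hq => hpos q (List.mem_cons_of_mem _ hq)),
      tStep_mem_keys m p.1 p.2 x (hpos p (List.mem_cons_self ..))]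
    tauto

lemma tFold_mem_keys (demand : List String) (m : PySem.Dict Char Int) (x : Char) :
    x ∈ (tFoldFrom demand m).keys ↔ x ∈ m.keys ∨ ∃ s ∈ demand, x ∈ s.toList := by
  induction demand generalizing m with
  | nil => simp [tFoldFrom]
  | cons s t ih =>
    simp only [tFoldFrom, List.foldl_cons]
    simp only [tFoldFrom] at ih
    rw [ih, fold_mem_keys _ m x (counter_items_pos s.toList)]
    have : x ∈ (PySem.Dict.counter s.toList).items.map Prod.fst ↔ x ∈ s.toList := by
      rw [PySem.Dict.items_counter]
      simp [PySem.Set.mem_ofList]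
    rw [this]
    simp only [List.mem_cons]
    constructor
    · rintro ((h | h) | ⟨u, hu, hx⟩)
      · exact Or.inl h
      · exact Or.inr ⟨s, Or.inl rfl, h⟩
      · exact Or.inr ⟨u, Or.inr hu, hx⟩
    · rintro (h | ⟨u, (rfl | hu), hx⟩)
      · exact Or.inl (Or.inl h)
      · exact Or.inl (Or.inr hx)
      · exact Or.inr ⟨u, hu, hx⟩

-- ---- the character set of B ----
lemma mem_update (S : PySem.Set Char) (l : List Char) (x : Char) :
    x ∈ PySem.Set.update S l ↔ x ∈ S ∨ x ∈ l := by
  unfold PySem.Set.update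
  induction l generalizing S with
  | nil => simp
  | cons a t ih =>
    simp only [List.foldl_cons, List.mem_cons]
    rw [ih, PySem.Set.mem_add]
    tauto

lemma nodup_update (S : PySem.Set Char) (l : List Char) (h : S.Nodup) :
    (PySem.Set.update S l).Nodup := by
  unfold PySem.Set.update
  induction l generalizing S with
  | nil => exact h
  | cons a t ih => exact ih _ (PySem.Set.nodup_add S a h)

lemma foldl_update_mem (t : List String) (S : PySem.Set Char) (x : Char) :
    x ∈ t.foldl (fun st s => PySem.Set.update st s.toList) S
      ↔ x ∈ S ∨ ∃ s ∈ t, x ∈ s.toList := by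
  induction t generalizing S with
  | nil => simp
  | cons u r ih =>
    rw [List.foldl_cons, ih, mem_update]
    simp only [List.mem_cons]
    constructor
    · rintro ((h | h) | ⟨w, hw, hx⟩)
      · exact Or.inl h
      · exact Or.inr ⟨u, Or.inl rfl, h⟩
      · exact Or.inr ⟨w, Or.inr hw, hx⟩
    · rintro (h | ⟨w, (rfl | hw), hx⟩)
      · exact Or.inl (Or.inl h)
      · exact Or.inl (Or.inr hx)
      · exact Or.inr ⟨w, hw, hx⟩

lemma foldl_update_nodup (t : List String) (S : PySem.Set Char) (h : S.Nodup) :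
    (t.foldl (fun st s => PySem.Set.update st s.toList) S).Nodup := by
  induction t generalizing S with
  | nil => exact h
  | cons u r ih => exact ih _ (nodup_update S u.toList h)

lemma mem_bChars (demand : List String) (x : Char) :
    x ∈ bChars demand ↔ ∃ s ∈ demand, x ∈ s.toList := by
  unfold bChars
  rw [foldl_update_mem]
  simp [PySem.Set.empty]

lemma nodup_bChars (demand : List String) : (bChars demand).Nodup := by
  unfold bChars
  exact foldl_update_nodup demand PySem.Set.empty (by simp [PySem.Set.empty])

-- the table's entry at a character that occurs somewhere equals B's max(s.count(c) …)
lemma getD_eq_bMax (demand : List String) (c : Char)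
    (h : ∃ s ∈ demand, c ∈ s.toList) :
    (tFoldFrom demand PySem.Dict.empty).getD c 0 = bMax demand c := by
  have h0 : ∀ x, (PySem.Dict.empty : PySem.Dict Char Int).getD x 0 = 0 := fun _ => rfl
  rw [outer_getD demand PySem.Dict.empty c (fun x => le_of_eq (h0 x).symm), h0]
  obtain ⟨s, hs, _⟩ := h
  cases demand with
  | nil => simp at hs
  | cons u t =>
    unfold bMax
    have hcnt : ∀ (w : String),
        ((PySem.Chars.count w.toList [c] : Nat) : Int) = ((w.toList.count c : Nat) : Int) := by
      intro w; rw [count_single]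
    simp only [List.map_cons, List.foldl_cons, PySem.List.max?_id_cons, Option.getD_some, hcnt]
    rw [max_eq_right (Int.natCast_nonneg _)]

-- ===== VERDICT (by name: the statement is the Claim_ definition above) =====
theorem minNumBooths_spec : Claim_equal_minNumBooths := by
  intro demand _
  unfold Spec_minNumBooths minNumBooths minNumBooths_alt
  have h := outer_fold demand PySem.Dict.empty PySem.Dict.nodup_keys_empty
  have h0 : (PySem.Dict.empty : PySem.Dict Char Int).values.sum = 0 := by
    simp [PySem.Dict.values, PySem.Dict.empty]
  rw [h0] at h
  rw [h.1]
  set T := tFoldFrom demand PySem.Dict.empty with hT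
  have hnd : T.keys.Nodup := h.2
  rw [PySem.Dict.values_eq_map_keys T hnd 0]
  have hkeys : ∀ k ∈ T.keys, T.getD k 0 = bMax demand k := by
    intro k hk
    have hex : ∃ s ∈ demand, k ∈ s.toList := by
      have := (tFold_mem_keys demand PySem.Dict.empty k).mp hk
      rcases this with h' | h'
      · simp [PySem.Dict.empty, PySem.Dict.keys] at h'
      · exact h'
    exact getD_eq_bMax demand k hex
  rw [List.map_congr_left hkeys]
  have hperm : T.keys.Perm (bChars demand) := by
    rw [List.perm_ext_iff_of_nodup hnd (nodup_bChars demand)]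
    intro a
    rw [tFold_mem_keys demand PySem.Dict.empty a, mem_bChars]
    simp [PySem.Dict.empty, PySem.Dict.keys]
  exact (hperm.map (fun c => bMax demand c)).sum_eq
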